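-- pv_equiv track=rewrite | github.com/ColeStrickler/EECS750-FinalProject | gadget_scans/gadget_stats.py | architecture_stats
-- ===== SOURCE A (Python) =====
-- def architecture_stats(gadgets):
--     x86 = 0
--     arm = 0
--     other = 0
--     not_arch = 0
--     for f in gadgets.keys():
--         num = len(gadgets[f])
--         if "arch" in f:
--             if "x86" in str(f):
--                 x86 += num
--             elif "arm" in str(f):
--                 arm += num
--             else:
--                 other += num
--         else:
--             not_arch += num
--     return None, {"x86": x86, "arm": arm, "other": other, "not_arc": not_arch}
-- ===== SOURCE B (Python) =====
-- def architecture_stats(gadgets):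
--     def bucket_total(pred):
--         return sum(len(v) for f, v in gadgets.items() if pred(f))
--     total = bucket_total(lambda f: True)
--     s_arch = bucket_total(lambda f: "arch" in f)
--     x86 = bucket_total(lambda f: "arch" in f and "x86" in str(f))
--     s_arm = bucket_total(lambda f: "arch" in f and "arm" in str(f))
--     s_both = bucket_total(lambda f: "arch" in f and "x86" in str(f) and "arm" in str(f))
--     arm = s_arm - s_both
--     return None, {"x86": x86, "arm": arm,
--                   "other": s_arch - x86 - arm, "not_arc": total - s_arch}
-- ===== Notes on version B (the rewrite author's own statement) =====
-- stated objective: alternative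
-- what changed: Replaces A's one-pass if/elif classification into four counters by inclusion-exclusion: five overlapping positive sums (total, arch, arch&x86, arch&arm, arch&x86&arm) with the arm, other and not_arc buckets derived by subtraction; no negated test or elif chain remains.
import Mathlib
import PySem

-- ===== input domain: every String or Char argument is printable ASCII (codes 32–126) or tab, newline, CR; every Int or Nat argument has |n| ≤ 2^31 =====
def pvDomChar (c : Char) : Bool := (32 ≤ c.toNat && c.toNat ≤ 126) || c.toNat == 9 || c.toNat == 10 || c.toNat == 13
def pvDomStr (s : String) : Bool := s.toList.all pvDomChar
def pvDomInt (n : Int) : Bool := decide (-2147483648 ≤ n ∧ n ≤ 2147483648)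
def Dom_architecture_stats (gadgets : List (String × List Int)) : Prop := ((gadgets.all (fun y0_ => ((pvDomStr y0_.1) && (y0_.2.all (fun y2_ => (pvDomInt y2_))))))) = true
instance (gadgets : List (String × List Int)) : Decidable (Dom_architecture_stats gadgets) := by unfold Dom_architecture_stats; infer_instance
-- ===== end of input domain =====

-- B replaces A's one-pass if/elif classification into four counters by inclusion–exclusion:
-- five overlapping positive sums, with arm/other/not_arc derived by subtraction (objective: alternative).

-- ===== PORT A =====
-- one step of A's loop body: num = len(gadgets[f]); the if/elif/else chain in A's order
def archStepA (d : PySem.Dict String (List Int)) (st : Int × Int × Int × Int) (f : String) :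
    Int × Int × Int × Int :=
  let num : Int := ((d.get? f).getD []).length
  if PySem.Str.isIn "arch" f then
    if PySem.Str.isIn "x86" f then (st.1 + num, st.2.1, st.2.2.1, st.2.2.2)
    else if PySem.Str.isIn "arm" f then (st.1, st.2.1 + num, st.2.2.1, st.2.2.2)
    else (st.1, st.2.1, st.2.2.1 + num, st.2.2.2)
  else (st.1, st.2.1, st.2.2.1, st.2.2.2 + num)

def architecture_stats (gadgets : List (String × List Int)) :
    Option Int × (List (String × Int)) :=
  let d := PySem.Dict.ofList gadgets
  let st := d.keys.foldl (archStepA d) (0, 0, 0, 0)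
  (none, [("x86", st.1), ("arm", st.2.1), ("other", st.2.2.1), ("not_arc", st.2.2.2)])

-- ===== PORT B =====
-- bucket_total(pred) = sum(len(v) for f, v in gadgets.items() if pred(f))
def bucketTotal (items : List (String × List Int)) (p : String → Bool) : Int :=
  ((items.filter (fun q => p q.1)).map (fun q => (q.2.length : Int))).sum

def architecture_stats_alt (gadgets : List (String × List Int)) :
    Option Int × (List (String × Int)) :=
  let items := (PySem.Dict.ofList gadgets).items
  let total := bucketTotal items (fun _ => true)
  let sArch := bucketTotal items (fun f => PySem.Str.isIn "arch" f)
  let x86 := bucketTotal items (fun f => PySem.Str.isIn "arch" f && PySem.Str.isIn "x86" f)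
  let sArm := bucketTotal items (fun f => PySem.Str.isIn "arch" f && PySem.Str.isIn "arm" f)
  let sBoth := bucketTotal items
      (fun f => PySem.Str.isIn "arch" f && PySem.Str.isIn "x86" f && PySem.Str.isIn "arm" f)
  let arm := sArm - sBoth
  (none, [("x86", x86), ("arm", arm), ("other", sArch - x86 - arm), ("not_arc", total - sArch)])

-- ===== PRECONDITION & SPEC =====
def Spec_architecture_stats (gadgets : List (String × List Int)) (out : Option Int × (List (String × Int))) : Prop := out = architecture_stats_alt gadgets
instance (gadgets : List (String × List Int)) (out : Option Int × (List (String × Int))) : Decidable (Spec_architecture_stats gadgets out) := by unfold Spec_architecture_stats; infer_instance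

-- ===== CLAIM (what is proved, stated in full; the proofs are below) =====
def Claim_equal_architecture_stats : Prop := ∀ (gadgets : List (String × List Int)), Dom_architecture_stats gadgets → Spec_architecture_stats gadgets (architecture_stats gadgets)

-- ===== LEMMAS AND PROOFS =====

theorem bucketTotal_cons (q : String × List Int) (l : List (String × List Int)) (p : String → Bool) :
    bucketTotal (q :: l) p = (if p q.1 then (q.2.length : Int) else 0) + bucketTotal l p := by
  simp [bucketTotal, List.filter_cons]
  split_ifs <;> simp

theorem bucketTotal_congr (l : List (String × List Int)) (p q : String → Bool)
    (h : ∀ f, p f = q f) : bucketTotal l p = bucketTotal l q := by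
  unfold bucketTotal
  rw [List.filter_congr (fun (x : String × List Int) _ => h x.1)]

-- splitting an overlapping sum along a second predicate
theorem bucketTotal_split (l : List (String × List Int)) (p q : String → Bool) :
    bucketTotal l p
      = bucketTotal l (fun f => p f && q f) + bucketTotal l (fun f => p f && !q f) := by
  induction l with
  | nil => simp [bucketTotal]
  | cons a l ih =>
    simp only [bucketTotal_cons, ih]
    cases hp : p a.1 <;> cases hq : q a.1 <;> simp <;> ring

-- A's loop over the first projections of l, when every pair of l looks up to its own value in d,
-- adds the four disjoint filtered sums of l to the accumulator.
theorem loopA_eq (d : PySem.Dict String (List Int)) (l : List (String × List Int))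
    (hl : ∀ p ∈ l, d.get? p.1 = some p.2) (st : Int × Int × Int × Int) :
    (l.map (·.1)).foldl (archStepA d) st =
      (st.1 + bucketTotal l (fun f => PySem.Str.isIn "arch" f && PySem.Str.isIn "x86" f),
       st.2.1 + bucketTotal l (fun f => PySem.Str.isIn "arch" f && !PySem.Str.isIn "x86" f && PySem.Str.isIn "arm" f),
       st.2.2.1 + bucketTotal l (fun f => PySem.Str.isIn "arch" f && !PySem.Str.isIn "x86" f && !PySem.Str.isIn "arm" f),
       st.2.2.2 + bucketTotal l (fun f => !PySem.Str.isIn "arch" f)) := by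
  induction l generalizing st with
  | nil => simp [bucketTotal]
  | cons q l ih =>
    have hq : d.get? q.1 = some q.2 := hl q (List.mem_cons_self ..)
    have hl' : ∀ p ∈ l, d.get? p.1 = some p.2 := fun p hp => hl p (List.mem_cons_of_mem _ hp)
    simp only [List.map_cons, List.foldl_cons, ih hl', bucketTotal_cons]
    simp only [archStepA, hq, Option.getD_some]
    split_ifs <;> simp_all <;> ring_nf

theorem architecture_stats_spec : Claim_equal_architecture_stats := by
  intro gadgets _
  have hl : ∀ p ∈ (PySem.Dict.ofList gadgets).items,
      (PySem.Dict.ofList gadgets).get? p.1 = some p.2 :=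
    fun p hp => PySem.Dict.get?_of_mem_items _ (by simpa using hp)
      (PySem.Dict.nodup_keys_ofList _)
  show (architecture_stats gadgets) = architecture_stats_alt gadgets
  unfold architecture_stats architecture_stats_alt
  simp only []
  rw [show (PySem.Dict.ofList gadgets).keys
        = (PySem.Dict.ofList gadgets).items.map (·.1) from rfl,
      loopA_eq _ _ hl]
  set l := (PySem.Dict.ofList gadgets).items with hlitems
  have h1 := bucketTotal_split l (fun _ => true) (fun f => PySem.Str.isIn "arch" f)
  have h2 := bucketTotal_split l (fun f => PySem.Str.isIn "arch" f) (fun f => PySem.Str.isIn "x86" f)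
  have h3 := bucketTotal_split l (fun f => PySem.Str.isIn "arch" f && !PySem.Str.isIn "x86" f)
      (fun f => PySem.Str.isIn "arm" f)
  have h4 := bucketTotal_split l (fun f => PySem.Str.isIn "arch" f && PySem.Str.isIn "arm" f)
      (fun f => PySem.Str.isIn "x86" f)
  have c1 : bucketTotal l (fun f => (fun _ => true) f && PySem.Str.isIn "arch" f)
      = bucketTotal l (fun f => PySem.Str.isIn "arch" f) :=
    bucketTotal_congr _ _ _ (fun f => by simp)
  have c2 : bucketTotal l (fun f => (PySem.Str.isIn "arch" f && PySem.Str.isIn "arm" f) && PySem.Str.isIn "x86" f)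
      = bucketTotal l (fun f => PySem.Str.isIn "arch" f && PySem.Str.isIn "x86" f && PySem.Str.isIn "arm" f) :=
    bucketTotal_congr _ _ _ (fun f => by cases PySem.Str.isIn "arch" f <;> cases PySem.Str.isIn "x86" f <;> cases PySem.Str.isIn "arm" f <;> rfl)
  have c3 : bucketTotal l (fun f => (PySem.Str.isIn "arch" f && PySem.Str.isIn "arm" f) && !PySem.Str.isIn "x86" f)
      = bucketTotal l (fun f => PySem.Str.isIn "arch" f && !PySem.Str.isIn "x86" f && PySem.Str.isIn "arm" f) :=
    bucketTotal_congr _ _ _ (fun f => by cases PySem.Str.isIn "arch" f <;> cases PySem.Str.isIn "x86" f <;> cases PySem.Str.isIn "arm" f <;> rfl)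
  have c4 : bucketTotal l (fun f => (PySem.Str.isIn "arch" f && !PySem.Str.isIn "x86" f) && PySem.Str.isIn "arm" f)
      = bucketTotal l (fun f => PySem.Str.isIn "arch" f && !PySem.Str.isIn "x86" f && PySem.Str.isIn "arm" f) :=
    bucketTotal_congr _ _ _ (fun f => by cases PySem.Str.isIn "arch" f <;> cases PySem.Str.isIn "x86" f <;> cases PySem.Str.isIn "arm" f <;> rfl)
  have c5 : bucketTotal l (fun f => (PySem.Str.isIn "arch" f && !PySem.Str.isIn "x86" f) && !PySem.Str.isIn "arm" f)
      = bucketTotal l (fun f => PySem.Str.isIn "arch" f && !PySem.Str.isIn "x86" f && !PySem.Str.isIn "arm" f) :=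
    bucketTotal_congr _ _ _ (fun f => by cases PySem.Str.isIn "arch" f <;> cases PySem.Str.isIn "x86" f <;> cases PySem.Str.isIn "arm" f <;> rfl)
  have c6 : bucketTotal l (fun f => (fun _ => true) f && !PySem.Str.isIn "arch" f)
      = bucketTotal l (fun f => !PySem.Str.isIn "arch" f) :=
    bucketTotal_congr _ _ _ (fun f => by simp)
  simp only [Prod.mk.injEq, List.cons.injEq, and_true, true_and]
  rw [c1, c6] at h1; rw [c2, c3] at h4; rw [c4, c5] at h3
  refine ⟨by omega, by omega, by omega, by omega⟩
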